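-- pv_equiv track=rewrite | github.com/piti03/advents_test_py | day6.py | get_unique_packets
-- ===== SOURCE A (Python) =====
-- def get_unique_packets(packet):
--     result = []
--     for string in packet:
--         container = []
--         for i in string:
--             container.append(string.count(i))
--         if sum(container) < 5:
--             result.append(packet.index(string))
--
--     return result
-- ===== SOURCE B (Python) =====
-- def get_unique_packets(packet):
--     # A string qualifies iff sum of per-char counts < 5; that sum equals
--     # len(s) + 2*(number of duplicate pairs), so it is < 5 exactly when
--     # len(s) <= 2, or len(s) <= 4 with all characters distinct.
--     first = {}
--     for i, s in enumerate(packet):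
--         if s not in first:
--             first[s] = i
--     return [first[s] for s in packet
--             if len(s) <= 2 or (len(s) <= 4 and len(set(s)) == len(s))]
-- ===== Notes on version B (the rewrite author's own statement) =====
-- stated objective: faster
-- what changed: Replaces the per-character string.count inner loop by the closed-form test 'len<=2 or (len<=4 and all chars distinct)' (since the sum of counts is len+2*duplicate-pairs) and replaces the repeated packet.index scan by a first-occurrence dict built in one pass.
import Mathlib
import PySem

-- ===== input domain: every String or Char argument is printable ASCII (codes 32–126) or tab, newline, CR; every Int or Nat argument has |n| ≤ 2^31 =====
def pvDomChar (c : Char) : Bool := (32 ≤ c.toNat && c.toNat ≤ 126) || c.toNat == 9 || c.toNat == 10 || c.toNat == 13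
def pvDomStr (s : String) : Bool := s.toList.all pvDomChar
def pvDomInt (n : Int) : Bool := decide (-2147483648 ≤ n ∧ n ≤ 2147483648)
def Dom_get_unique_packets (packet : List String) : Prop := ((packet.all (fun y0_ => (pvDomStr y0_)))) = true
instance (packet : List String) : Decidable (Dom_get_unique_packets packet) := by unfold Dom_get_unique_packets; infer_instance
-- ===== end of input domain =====

-- B replaces the per-character string.count inner loop by the closed-form test
-- "len ≤ 2 or (len ≤ 4 and all chars distinct)" and the repeated packet.index scan
-- by a first-occurrence dict built in one pass (objective: faster).

-- ===== PORT A =====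
def get_unique_packets (packet : List String) : List Int :=
  packet.foldl (fun result string =>
    let container : List Int :=
      string.toList.foldl
        (fun container i => container ++ [(PySem.Str.count string (String.ofList [i]) : Int)]) []
    if container.sum < 5 then
      -- packet.index(string): string ∈ packet here, so index? is always some and .getD 0 is exact
      result ++ [((PySem.List.index? packet string).getD 0 : Int)]
    else result) []

-- ===== PORT B =====
def gup_first (packet : List String) : PySem.Dict String Int :=
  (PySem.List.enumerate packet).foldl
    (fun first p => if first.contains p.2 then first else first.insert p.2 p.1)
    PySem.Dict.empty

def gup_small (s : String) : Bool :=
  decide (PySem.Str.len s ≤ 2) ||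
    (decide (PySem.Str.len s ≤ 4) &&
      (PySem.Set.len (PySem.Set.ofList s.toList) == PySem.Str.len s))

def get_unique_packets_alt (packet : List String) : List Int :=
  let first := gup_first packet
  -- first[s]: s ∈ packet, so s is a key of first and .getD 0 is exact
  (packet.filter gup_small).map (fun s => first.getD s 0)

-- ===== PRECONDITION & SPEC =====
def Spec_get_unique_packets (packet : List String) (out : List Int) : Prop := out = get_unique_packets_alt packet
instance (packet : List String) (out : List Int) : Decidable (Spec_get_unique_packets packet out) := by unfold Spec_get_unique_packets; infer_instance

-- ===== CLAIM (what is proved, stated in full; the proofs are below) =====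
def Claim_equal_get_unique_packets : Prop := ∀ (packet : List String), Dom_get_unique_packets packet → Spec_get_unique_packets packet (get_unique_packets packet)

-- ===== LEMMAS AND PROOFS =====

-- string.count with a single-character needle is the element count
lemma gup_count_go_single (c : Char) (l : List Char) (fuel acc : Nat) (h : l.length ≤ fuel) :
    PySem.Chars.count.go [c] fuel l acc = acc + l.count c := by
  induction l generalizing fuel acc with
  | nil => cases fuel <;> simp [PySem.Chars.count.go]
  | cons x t ih =>
    cases fuel with
    | zero => simp at h
    | succ f =>
      simp only [PySem.Chars.count.go]
      by_cases hcx : c = x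
      · subst hcx
        simp [List.isPrefixOf, ih f (acc + 1) (by simpa using h)]
        omega
      · simp [List.isPrefixOf, Ne.symm hcx, hcx, ih f acc (by simpa using h)]

lemma gup_count_single (l : List Char) (c : Char) :
    PySem.Chars.count l [c] = l.count c := by
  rw [PySem.Chars.count]
  simpa using gup_count_go_single c l l.length 0 le_rfl

-- sum of per-char counts: bounds
lemma gup_sum_nodup (l : List Char) (h : l.Nodup) :
    (l.map (fun c => (l.count c : Int))).sum = l.length := by
  have : l.map (fun c => (l.count c : Int)) = l.map (fun _ => (1 : Int)) := by
    apply List.map_congr_left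
    intro c hc
    simp [List.count_eq_one_of_mem h hc]
  rw [this, PySem.List.sum_map_const_int]; ring

lemma gup_sum_dup (l : List Char) (h : ¬ l.Nodup) :
    (l.length : Int) + 2 ≤ (l.map (fun c => (l.count c : Int))).sum := by
  have ⟨a, ha2⟩ : ∃ a, 2 ≤ l.count a := by
    rw [List.nodup_iff_count_le_one] at h
    obtain ⟨a, ha⟩ := not_forall.mp h
    exact ⟨a, by omega⟩
  have hmem : a ∈ l := List.count_pos_iff.mp (by omega)
  have h1 : ((l.map (fun c => (1 : Int) + (if c == a then 1 else 0))).sum)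
      ≤ (l.map (fun c => (l.count c : Int))).sum := by
    apply List.sum_le_sum
    intro c hc
    by_cases hca : c = a
    · subst hca; simp; exact_mod_cast ha2
    · simp [hca]
      exact hc
  rw [PySem.List.sum_map_add_int, PySem.List.sum_map_const_int,
      PySem.List.sum_map_ite_one_zero] at h1
  have hcnt : l.countP (· == a) = l.count a := rfl
  rw [hcnt] at h1
  have : (l.count a : Int) ≥ 2 := by exact_mod_cast ha2
  omega

lemma gup_sum_ub2 (l : List Char) (h : l.length ≤ 2) :
    (l.map (fun c => (l.count c : Int))).sum ≤ 4 := by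
  have h1 : (l.map (fun c => (l.count c : Int))).sum ≤ (l.map (fun _ => (2 : Int))).sum := by
    apply List.sum_le_sum
    intro c hc
    have := List.count_le_length (l := l) (a := c)
    have : l.count c ≤ 2 := by omega
    exact_mod_cast this
  rw [PySem.List.sum_map_const_int] at h1
  have : (l.length : Int) ≤ 2 := by exact_mod_cast h
  omega

-- the closed-form characterisation of A's test
lemma gup_cond_iff (l : List Char) :
    ((l.map (fun c => (l.count c : Int))).sum < 5) ↔
      (l.length ≤ 2 ∨ (l.length ≤ 4 ∧ l.Nodup)) := by
  constructor
  · intro h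
    by_cases hnd : l.Nodup
    · have he := gup_sum_nodup l hnd
      have hl4 : l.length ≤ 4 := by exact_mod_cast (by omega : (l.length : Int) ≤ 4)
      exact Or.inr ⟨hl4, hnd⟩
    · have hd := gup_sum_dup l hnd
      exact Or.inl (by exact_mod_cast (by omega : (l.length : Int) ≤ 2))
  · intro h
    rcases h with h2 | ⟨h4, hnd⟩
    · have := gup_sum_ub2 l h2; omega
    · have he := gup_sum_nodup l hnd
      have : (l.length : Int) ≤ 4 := by exact_mod_cast h4
      omega

-- |set(l)| = |l| iff no duplicates
lemma gup_set_lt (l : List Char) (h : ¬ l.Nodup) :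
    (PySem.Set.ofList l).length < l.length := by
  induction l with
  | nil => simp at h
  | cons x t ih =>
    rw [PySem.Set.ofList_cons]
    by_cases hx : x ∈ t
    · have hmem : x ∈ PySem.Set.ofList t := (PySem.Set.mem_ofList t x).mpr hx
      have hlt : ((PySem.Set.ofList t).discard x).length < (PySem.Set.ofList t).length := by
        unfold PySem.Set.discard
        apply List.length_filter_lt_length_iff_exists.mpr
        exact ⟨x, hmem, by simp⟩
      have hle := PySem.Set.length_ofList_le t
      simp only [List.length_cons]
      omega
    · have hnt : ¬ t.Nodup := by
        intro hnd; exact h (List.nodup_cons.mpr ⟨hx, hnd⟩)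
      have hlt := ih hnt
      have hle : ((PySem.Set.ofList t).discard x).length ≤ (PySem.Set.ofList t).length := by
        unfold PySem.Set.discard
        exact List.length_filter_le _ _
      simp only [List.length_cons]
      omega

lemma gup_set_iff (l : List Char) :
    (PySem.Set.ofList l).length = l.length ↔ l.Nodup := by
  constructor
  · intro h
    by_contra hnd
    have := gup_set_lt l hnd
    omega
  · intro h
    rw [PySem.Set.ofList_eq_self_of_nodup l h]

-- B's test equals the closed-form condition
lemma gup_small_iff (s : String) :
    gup_small s = true ↔ (s.toList.length ≤ 2 ∨ (s.toList.length ≤ 4 ∧ s.toList.Nodup)) := by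
  unfold gup_small
  rw [Bool.or_eq_true, Bool.and_eq_true]
  simp only [decide_eq_true_eq, beq_iff_eq, PySem.Str.len_eq, PySem.Set.len_eq]
  constructor
  · rintro (h | ⟨h4, hset⟩)
    · exact Or.inl (by exact_mod_cast h)
    · refine Or.inr ⟨by exact_mod_cast h4, (gup_set_iff s.toList).mp (by exact_mod_cast hset)⟩
  · rintro (h | ⟨h4, hnd⟩)
    · exact Or.inl (by exact_mod_cast h)
    · refine Or.inr ⟨by exact_mod_cast h4, by rw [(gup_set_iff s.toList).mpr hnd]⟩

-- the first-occurrence dict over enumerate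
lemma gup_first_aux (l : List String) (k : Int) (d : PySem.Dict String Int) (s : String) :
    ((PySem.List.enumerate l k).foldl
        (fun first p => if first.contains p.2 then first else first.insert p.2 p.1) d).get? s
      = (d.get? s).or ((PySem.List.index? l s).map (fun n : Nat => k + (n : Int))) := by
  induction l generalizing k d with
  | nil => simp [PySem.List.enumerate_nil, PySem.List.index?_eq_idxOf?]
  | cons x t ih =>
    rw [PySem.List.enumerate_cons, List.foldl_cons, ih]
    by_cases hsx : s = x
    · subst hsx
      by_cases hc : d.contains s
      · simp only [hc, if_true]
        have hs : (d.get? s).isSome := by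
          rw [← PySem.Dict.contains_eq_isSome_get?]; exact hc
        rcases Option.isSome_iff_exists.mp hs with ⟨v, hv⟩
        simp [hv]
      · simp only [hc, Bool.false_eq_true, if_false]
        rw [PySem.Dict.get?_insert,
            (PySem.Dict.get?_eq_none_iff_contains d s).mpr (by simp [hc]),
            PySem.List.index?_cons_self]
        simp
    · have hix : PySem.List.index? (x :: t) s = (PySem.List.index? t s).map (· + 1) :=
        PySem.List.index?_cons_of_ne t (Ne.symm hsx)
      rw [hix]
      have hmaps : ((PySem.List.index? t s).map (· + 1)).map (fun n : Nat => k + (n : Int))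
          = (PySem.List.index? t s).map (fun n : Nat => k + 1 + (n : Int)) := by
        rw [Option.map_map]
        apply congrFun
        apply congrArg
        funext n
        simp only [Function.comp_apply]
        push_cast
        ring
      rw [hmaps]
      by_cases hc : d.contains x
      · simp only [hc, if_true]
      · simp only [hc, Bool.false_eq_true, if_false]
        rw [PySem.Dict.get?_insert]
        simp only [hsx, if_false]

lemma gup_first_getD (packet : List String) (s : String) (hs : s ∈ packet) :
    (gup_first packet).getD s 0 = ((PySem.List.index? packet s).getD 0 : Int) := by
  rcases Option.isSome_iff_exists.mp ((PySem.List.index?_isSome_iff packet s).mpr hs) with ⟨n, hn⟩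
  rw [PySem.Dict.getD_eq_get?_getD]
  unfold gup_first
  rw [gup_first_aux, PySem.Dict.get?_empty, hn]
  simp

-- A's accumulator loop as filter+map
lemma gup_A_shape (packet : List String) :
    get_unique_packets packet
      = (packet.filter (fun s =>
            decide ((s.toList.map (fun c => (PySem.Str.count s (String.ofList [c]) : Int))).sum < 5))).map
          (fun s => ((PySem.List.index? packet s).getD 0 : Int)) := by
  unfold get_unique_packets
  have h := PySem.List.foldl_append_if
      (fun s => decide ((s.toList.map (fun c => (PySem.Str.count s (String.ofList [c]) : Int))).sum < 5))
      (fun s => ((PySem.List.index? packet s).getD 0 : Int)) packet []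
  simp only [decide_eq_true_eq, List.nil_append] at h
  simp only [PySem.List.foldl_append_singleton_eq_map, List.nil_append]
  exact h

-- A's test, as a Bool, is B's test
lemma gup_cond_eq (s : String) :
    decide ((s.toList.map (fun c => (PySem.Str.count s (String.ofList [c]) : Int))).sum < 5)
      = gup_small s := by
  have hcount : (s.toList.map (fun c => (PySem.Str.count s (String.ofList [c]) : Int)))
      = s.toList.map (fun c => (s.toList.count c : Int)) := by
    apply List.map_congr_left
    intro c _
    rw [PySem.Str.count_eq]
    norm_num [gup_count_single]
  rw [hcount]
  have hiff := (gup_cond_iff s.toList).trans (gup_small_iff s).symm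
  cases hsm : gup_small s
  · simp only [decide_eq_false_iff_not]
    intro hcond
    rw [hiff, hsm] at hcond
    exact Bool.false_ne_true hcond
  · simp only [decide_eq_true_eq]
    rw [hiff]
    exact hsm

-- ===== VERDICT (by name: the statement is the Claim_ definition above) =====
theorem get_unique_packets_spec : Claim_equal_get_unique_packets := by
  intro packet _
  unfold Spec_get_unique_packets get_unique_packets_alt
  show _ = (packet.filter gup_small).map (fun s => (gup_first packet).getD s 0)
  rw [gup_A_shape, List.filter_congr (fun s _ => gup_cond_eq s)]
  apply List.map_congr_left
  intro s hs
  exact (gup_first_getD packet s (List.mem_filter.mp hs).1).symm
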